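-- pv_equiv track=rewrite | github.com/rowlandholden76/DeVry-CEIS110 | Calculator.py | find_operator_pos
-- ===== SOURCE A (Python) =====
-- def find_operator_pos(expr: str, precidence: str = 'mult_div') -> int:
--     """finds the next operator in the expression that should be solved next, assuming multiplication and division first
--
--     Args:
--         expr (string): number of operators found in the expression
--         precidence (string): precidence to look for
--
--     Returns:
--         int: position of operator to solve for next
--
--     Examples:
--         >>> self.find_operator_pos("15+9*2", "add_sub")
--         4
--         >>> self.find_operator_pos("15*9+2+8-4")
--         2
--     """
--     if precidence == "mult_div":
--         operators = ["*", "/", "%"]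
--     elif precidence == "exponent":
--         operators = ["^"]
--         if "^" in expr:
--             first_operator = expr.rfind("^")
--             return first_operator
--     else:
--         operators = ["+", "-"]
--
--     first_operator = -1
--     for i, char in enumerate(expr):
--         if char in operators:
--             if not (char=="-" and i == 0):
--                 first_operator = char
--                 break # Stop at the first match
--
--     if first_operator == -1:
--         return -1
--     if first_operator == "-" and expr[0] == "-":
--         return expr.find(first_operator, 1)
--
--     return expr.find(first_operator)
-- ===== SOURCE B (Python) =====
-- def find_operator_pos(expr: str, precidence: str = 'mult_div') -> int:
--     if precidence == "exponent":
--         return expr.rfind("^")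
--     ops = ["*", "/", "%"] if precidence == "mult_div" else ["+", "-"]
--     positions = [p for p in ((expr.find(op, 1) if op == "-" else expr.find(op)) for op in ops) if p != -1]
--     return min(positions) if positions else -1
-- ===== Notes on version B (the rewrite author's own statement) =====
-- stated objective: faster
-- what changed: Replaces A's Python-level character-by-character enumerate scan followed by a re-find of the found operator with a per-operator index build (one expr.find per operator, searching minus from index 1 to skip a leading sign) and a min reduction over the hit positions, returning expr.rfind directly for the exponent precedence.
import Mathlib
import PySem

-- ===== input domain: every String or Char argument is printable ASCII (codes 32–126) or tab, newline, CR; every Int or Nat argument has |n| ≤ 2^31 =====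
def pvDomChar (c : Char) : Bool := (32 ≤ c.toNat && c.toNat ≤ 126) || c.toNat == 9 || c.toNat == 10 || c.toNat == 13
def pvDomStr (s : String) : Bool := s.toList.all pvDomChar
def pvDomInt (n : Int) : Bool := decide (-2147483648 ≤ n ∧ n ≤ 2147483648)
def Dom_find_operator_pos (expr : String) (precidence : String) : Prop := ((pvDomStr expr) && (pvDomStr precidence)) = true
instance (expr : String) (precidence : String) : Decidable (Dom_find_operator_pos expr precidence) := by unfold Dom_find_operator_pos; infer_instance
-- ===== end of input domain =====

-- B replaces A's character-by-character scan-then-refind with per-operator find positions and a min reduction (objective: faster, measured constant-factor win from C-level str.find).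

-- ===== PORT A =====
-- the for-loop over enumerate(expr): first char in operators, not counting '-' at index 0
def fopLoop (ps : List (Int × Char)) (ops : List Char) : Option Char :=
  match ps with
  | [] => none
  | (i, c) :: rest => if c ∈ ops ∧ ¬(c = '-' ∧ i = 0) then some c else fopLoop rest ops

-- the loop plus A's tail (the first_operator == -1 check, the '-'-at-0 re-find, the plain re-find)
def fopTail (expr : String) (ops : List Char) : Int :=
  match fopLoop (PySem.List.enumerate expr.toList 0) ops with
  | none => -1
  | some c =>
    if c = '-' ∧ PySem.Str.pyGet? expr 0 = some '-' then PySem.Str.findFrom expr "-" 1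
    else PySem.Str.find expr (String.ofList [c])

def find_operator_pos (expr : String) (precidence : String) : Int :=
  if precidence == "mult_div" then fopTail expr ['*', '/', '%']
  else if precidence == "exponent" then
    if PySem.Str.isIn "^" expr then PySem.Str.rfind expr "^"
    else fopTail expr ['^']
  else fopTail expr ['+', '-']

-- ===== PORT B =====
def altOpPos (expr : String) (op : Char) : Int :=
  if op = '-' then PySem.Str.findFrom expr "-" 1 else PySem.Str.find expr (String.ofList [op])

def find_operator_pos_alt (expr : String) (precidence : String) : Int :=
  if precidence == "exponent" then PySem.Str.rfind expr "^"
  else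
    let ops : List Char := if precidence == "mult_div" then ['*', '/', '%'] else ['+', '-']
    let positions := (ops.map (fun op => altOpPos expr op)).filter (fun p => p ≠ -1)
    match PySem.List.min? positions (fun x => x) with
    | some m => m
    | none => -1

-- ===== PRECONDITION & SPEC =====
def Spec_find_operator_pos (expr : String) (precidence : String) (out : Int) : Prop := out = find_operator_pos_alt expr precidence
instance (expr : String) (precidence : String) (out : Int) : Decidable (Spec_find_operator_pos expr precidence out) := by unfold Spec_find_operator_pos; infer_instance

-- ===== CLAIM (what is proved, stated in full; the proofs are below) =====
def Claim_equal_find_operator_pos : Prop := ∀ (expr : String) (precidence : String), Dom_find_operator_pos expr precidence → Spec_find_operator_pos expr precidence (find_operator_pos expr precidence)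

-- ===== LEMMAS AND PROOFS =====

-- proof-side reference: Python find of a single char, as an Int index (-1 absent)
def idxInt (l : List Char) (c : Char) : Int :=
  match PySem.List.index? l c with
  | some k => (k : Int)
  | none => -1

def shiftI (x : Int) : Int := if x = -1 then -1 else x + 1

-- first index whose char is in ops, -1 if none
def fIdx (l : List Char) (ops : List Char) : Int :=
  match l with
  | [] => -1
  | a :: t => if a ∈ ops then 0 else shiftI (fIdx t ops)

def minOr (xs : List Int) : Int :=
  match PySem.List.min? xs (fun x => x) with
  | some m => m
  | none => -1

lemma singleton_prefix_iff (c : Char) (t : List Char) : [c] <+: t ↔ t.head? = some c := by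
  cases t with
  | nil => simp
  | cons b bt => simp [List.cons_prefix_cons, eq_comm]

lemma shiftI_ge {x : Int} (hx : -1 ≤ x) : -1 ≤ shiftI x := by
  unfold shiftI; split <;> omega

lemma neg_one_le_idxInt (l : List Char) (c : Char) : -1 ≤ idxInt l c := by
  unfold idxInt; cases PySem.List.index? l c <;> simp

lemma idxInt_cons_self (t : List Char) (c : Char) : idxInt (c :: t) c = 0 := by
  unfold idxInt; rw [PySem.List.index?_cons_self]; rfl

lemma idxInt_cons_ne {a c : Char} (t : List Char) (h : a ≠ c) :
    idxInt (a :: t) c = shiftI (idxInt t c) := by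
  unfold idxInt shiftI
  rw [PySem.List.index?_cons_of_ne _ h]
  cases PySem.List.index? t c <;> simp

lemma find_singleton (l : List Char) (c : Char) :
    PySem.Chars.find l [c] = idxInt l c := by
  cases h : PySem.List.index? l c with
  | none =>
    have hmem : c ∉ l := (PySem.List.index?_eq_none_iff _ _).1 h
    have hni : ¬ [c] <:+: l := fun hin => hmem ((List.singleton_infix_iff c l).1 hin)
    unfold idxInt; rw [h, (PySem.Chars.find_eq_neg_one_iff _ _).2 hni]
  | some k =>
    obtain ⟨hk, hget, hmin⟩ := PySem.List.getElem_of_index?_eq_some h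
    have hmem : c ∈ l := hget ▸ List.getElem_mem hk
    have hne : PySem.Chars.find l [c] ≠ -1 :=
      (PySem.Chars.find_ne_neg_one_iff _ _).2 ((List.singleton_infix_iff c l).2 hmem)
    have h0 : 0 ≤ PySem.Chars.find l [c] := by
      have := PySem.Chars.neg_one_le_find l [c]; omega
    obtain ⟨hpre, hmin2⟩ := PySem.Chars.find_spec h0
    set n := (PySem.Chars.find l [c]).toNat with hn
    have hgn : l[n]? = some c := by
      rw [← List.head?_drop]; exact (singleton_prefix_iff c _).1 hpre
    have hnk1 : ¬ n < k := by
      intro hlt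
      exact hmin n hlt ((List.getElem?_eq_some_iff.1 hgn).2.symm ▸ rfl)
    have hnk2 : ¬ k < n := by
      intro hlt
      exact hmin2 k hlt ((singleton_prefix_iff c _).2
        (by rw [List.head?_drop, List.getElem?_eq_some_iff]; exact ⟨hk, hget⟩))
    have hnkeq : n = k := by omega
    unfold idxInt; rw [h]
    show PySem.Chars.find l [c] = (k : Int)
    omega

lemma findFrom_cons (a : Char) (t : List Char) (c : Char) :
    PySem.Chars.findFrom (a :: t) [c] 1 none = shiftI (idxInt t c) := by
  have h := PySem.Chars.findFrom_natCast (a :: t) [c] 1 (by simp)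
  norm_num at h
  rw [h, find_singleton t c]
  unfold shiftI
  split_ifs <;> omega

lemma mem_of_singleton_isPrefixOf {c : Char} {m : List Char} (h : List.isPrefixOf [c] m = true) :
    c ∈ m :=
  List.mem_of_mem_head? ((singleton_prefix_iff c m).1 (List.isPrefixOf_iff_prefix.1 h))

lemma rfind_go_not_mem {l : List Char} {c : Char} (h : c ∉ l) :
    ∀ j, PySem.Chars.rfind.go l [c] j = -1 := by
  have hp : ∀ m : List Char, c ∉ m → List.isPrefixOf [c] m = false := by
    intro m hm
    rw [Bool.eq_false_iff]
    exact fun ht => hm (mem_of_singleton_isPrefixOf ht)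
  intro j
  induction j with
  | zero => rw [PySem.Chars.rfind.go]; simp [hp l h]
  | succ j ih =>
    rw [PySem.Chars.rfind.go]
    have hd : c ∉ l.drop (j + 1) := fun hm => h (List.mem_of_mem_drop hm)
    simp [hp _ hd, ih]

lemma rfind_not_mem {l : List Char} {c : Char} (h : c ∉ l) :
    PySem.Chars.rfind l [c] = -1 := by
  rw [PySem.Chars.rfind]; exact rfind_go_not_mem h _

lemma fIdx_not_mem {l ops : List Char} (h : ∀ x ∈ l, x ∉ ops) : fIdx l ops = -1 := by
  induction l with
  | nil => rfl
  | cons a t ih =>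
    have := h a (by simp)
    simp [fIdx, this, ih (fun x hx => h x (by simp [hx])), shiftI]

lemma minOr_zero {xs : List Int} (h0 : (0 : Int) ∈ xs) (hall : ∀ x ∈ xs, 0 ≤ x) :
    minOr xs = 0 := by
  unfold minOr
  cases hm : PySem.List.min? xs (fun x => x) with
  | none =>
    rw [(PySem.List.min?_eq_none_iff xs _).1 hm] at h0
    simp at h0
  | some m =>
    have h1 := PySem.List.min?_isMin hm 0 h0
    have h2 := hall m (PySem.List.min?_mem hm)
    simp only []
    omega

lemma minOr_map_add_one {xs : List Int} (hall : ∀ x ∈ xs, 0 ≤ x) :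
    minOr (xs.map (· + 1)) = shiftI (minOr xs) := by
  unfold minOr
  cases hm : PySem.List.min? xs (fun x => x) with
  | none =>
    rw [(PySem.List.min?_eq_none_iff xs _).1 hm]
    simp [PySem.List.min?, shiftI]
  | some m =>
    have hmm := PySem.List.min?_mem hm
    have hmin := PySem.List.min?_isMin hm
    have hm0 : 0 ≤ m := hall m hmm
    cases hm' : PySem.List.min? (xs.map (· + 1)) (fun x => x) with
    | none =>
      have := (PySem.List.min?_eq_none_iff (xs.map (· + 1)) _).1 hm'
      rw [List.map_eq_nil_iff] at this
      rw [this] at hm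
      rw [(PySem.List.min?_eq_none_iff [] _).2 rfl] at hm
      cases hm
    | some m' =>
      have hmm' := PySem.List.min?_mem hm'
      have hmin' := PySem.List.min?_isMin hm'
      obtain ⟨y, hy, hym⟩ := List.mem_map.1 hmm'
      have h1 : m' ≤ m + 1 := hmin' (m + 1) (List.mem_map.2 ⟨m, hmm, rfl⟩)
      have h2 : m ≤ y := hmin y hy
      have hne : m ≠ -1 := by omega
      simp only [shiftI, if_neg hne]
      omega

lemma filter_shift {zs : List Int} (hz : ∀ z ∈ zs, -1 ≤ z) :
    (zs.map shiftI).filter (fun p => p ≠ -1) = (zs.filter (fun p => p ≠ -1)).map (· + 1) := by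
  induction zs with
  | nil => rfl
  | cons z t ih =>
    have hzz := hz z (by simp)
    have iht := ih (fun x hx => hz x (by simp [hx]))
    by_cases he : z = -1
    · have hs : shiftI z = -1 := by simp [shiftI, he]
      simp only [List.map_cons, List.filter_cons, he]
      simp only [show (decide (¬(-1 : Int) = -1)) = false by decide, Bool.false_eq_true, if_false]
      simpa using iht
    · have hs : shiftI z = z + 1 := by simp [shiftI, he]
      simp only [List.map_cons, List.filter_cons, hs]
      simp only [show (decide (¬(z + 1) = -1)) = true by simpa using (by omega : ¬ z + 1 = -1),
        show (decide (¬z = -1)) = true by simpa using he, if_true]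
      simpa using iht

lemma fopLoop_eq_find? (t : List Char) (ops : List Char) (s : Int)
    (h : '-' ∉ ops ∨ 1 ≤ s) :
    fopLoop (PySem.List.enumerate t s) ops = t.find? (fun c => decide (c ∈ ops)) := by
  induction t generalizing s with
  | nil => simp [PySem.List.enumerate_nil, fopLoop]
  | cons a t ih =>
    rw [PySem.List.enumerate_cons, fopLoop]
    by_cases ha : a ∈ ops
    · have hns : ¬(a = '-' ∧ s = 0) := by
        rcases h with h | h
        · exact fun he => h (he.1 ▸ ha)
        · exact fun he => by omega
      rw [if_pos ⟨ha, hns⟩, List.find?_cons_of_pos (by simpa using ha)]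
    · rw [if_neg (fun he => ha he.1), List.find?_cons_of_neg (by simpa using ha)]
      exact ih (s + 1) (by rcases h with h | h; exact Or.inl h; exact Or.inr (by omega))

lemma find?_fIdx (t : List Char) (ops : List Char) :
    (match t.find? (fun c => decide (c ∈ ops)) with
     | none => fIdx t ops = -1
     | some c => fIdx t ops = idxInt t c) := by
  induction t with
  | nil => simp [fIdx]
  | cons a t ih =>
    by_cases ha : a ∈ ops
    · rw [List.find?_cons_of_pos (by simpa using ha)]
      simp [fIdx, ha, idxInt_cons_self]
    · rw [List.find?_cons_of_neg (by simpa using ha)]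
      cases h : t.find? (fun c => decide (c ∈ ops)) with
      | none => rw [h] at ih; simp [fIdx, ha, ih, shiftI]
      | some c =>
        rw [h] at ih
        have hc : c ∈ ops := by have := List.find?_some h; simpa using this
        have hac : a ≠ c := fun he => ha (he ▸ hc)
        simp [fIdx, ha, ih, idxInt_cons_ne t hac]

-- B's min-reduction over per-op first positions is the first index whose char is in ops
lemma minOr_filter_idx (l : List Char) (ops : List Char) :
    minOr ((ops.map (fun op => idxInt l op)).filter (fun p => p ≠ -1)) = fIdx l ops := by
  induction l with
  | nil =>
    have hnil : ∀ op, idxInt ([] : List Char) op = -1 := fun op => by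
      simp [idxInt, PySem.List.index?]
    simp [hnil, fIdx, minOr, PySem.List.min?]
  | cons a t ih =>
    by_cases ha : a ∈ ops
    · rw [show fIdx (a :: t) ops = 0 from by simp [fIdx, ha]]
      apply minOr_zero
      · rw [List.mem_filter]
        exact ⟨List.mem_map.2 ⟨a, ha, idxInt_cons_self t a⟩, by decide⟩
      · intro x hx
        obtain ⟨hxm, hxne⟩ := List.mem_filter.1 hx
        obtain ⟨op, _, heq⟩ := List.mem_map.1 hxm
        have := neg_one_le_idxInt (a :: t) op
        simp at hxne
        omega
    · have hmap : ops.map (fun op => idxInt (a :: t) op) =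
          (ops.map (fun op => idxInt t op)).map shiftI := by
        rw [List.map_map]
        exact List.map_congr_left (fun op hop =>
          idxInt_cons_ne t (fun he => ha (he ▸ hop)))
      rw [hmap, filter_shift (by
          intro z hz; obtain ⟨op, _, heq⟩ := List.mem_map.1 hz
          exact heq ▸ neg_one_le_idxInt t op),
        minOr_map_add_one (by
          intro x hx
          obtain ⟨hxm, hxne⟩ := List.mem_filter.1 hx
          obtain ⟨op, _, heq⟩ := List.mem_map.1 hxm
          have := neg_one_le_idxInt t op
          simp at hxne
          omega), ih]
      simp [fIdx, ha]

lemma fopTail_eq_fIdx {expr : String} {ops : List Char} (h : '-' ∉ ops) :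
    fopTail expr ops = fIdx expr.toList ops := by
  unfold fopTail
  rw [fopLoop_eq_find? _ _ 0 (Or.inl h)]
  have hC := find?_fIdx expr.toList ops
  cases hf : expr.toList.find? (fun c => decide (c ∈ ops)) with
  | none => rw [hf] at hC; simp [hC]
  | some c =>
    rw [hf] at hC
    dsimp only
    have hc : c ∈ ops := by have := List.find?_some hf; simpa using this
    have hcm : c ≠ '-' := fun he => h (he ▸ hc)
    rw [if_neg (fun hh => hcm hh.1)]
    rw [PySem.Str.find_eq, String.toList_ofList, find_singleton, hC]

lemma fopTail_addsub (expr : String) :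
    fopTail expr ['+', '-'] =
      minOr (((['+', '-'] : List Char).map (fun op => altOpPos expr op)).filter (fun p => p ≠ -1)) := by
  have hplus : altOpPos expr '+' = PySem.Chars.find expr.toList ['+'] := by
    simp [altOpPos, PySem.Str.find_eq]
  have hminus : altOpPos expr '-' = PySem.Chars.findFrom expr.toList ['-'] 1 none := by
    simp [altOpPos, PySem.Str.findFrom_eq]
  cases hl : expr.toList with
  | nil =>
    have h1 : altOpPos expr '+' = -1 := by rw [hplus, hl]; decide
    have h2 : altOpPos expr '-' = -1 := by rw [hminus, hl]; decide
    rw [fopTail, hl]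
    simp [PySem.List.enumerate_nil, fopLoop, h1, h2, minOr, PySem.List.min?]
  | cons a t =>
    have hget : PySem.Str.pyGet? expr 0 = some a := by
      simp [pysem, hl]
    have hminus' : altOpPos expr '-' = shiftI (idxInt t '-') := by
      rw [hminus, hl, findFrom_cons]
    rw [fopTail, hl, PySem.List.enumerate_cons, fopLoop]
    have hplus' : altOpPos expr '+' = idxInt (a :: t) '+' := by
      rw [hplus, hl, find_singleton]
    have hB : minOr (((['+', '-'] : List Char).map (fun op => altOpPos expr op)).filter (fun p => p ≠ -1)) =
        minOr (([idxInt (a :: t) '+', shiftI (idxInt t '-')]).filter (fun p => p ≠ -1)) := by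
      simp only [List.map_cons, List.map_nil, hplus', hminus']
    by_cases hap : a = '+'
    · subst hap
      rw [if_pos (by decide)]
      dsimp only
      rw [if_neg (fun hh => absurd hh.1 (by decide))]
      rw [PySem.Str.find_eq, String.toList_ofList, hl, find_singleton, idxInt_cons_self, hB,
        idxInt_cons_self]
      refine (minOr_zero (by simp) ?_).symm
      intro x hx
      obtain ⟨hxm, hxne⟩ := List.mem_filter.1 hx
      have hge : -1 ≤ shiftI (idxInt t '-') := shiftI_ge (neg_one_le_idxInt t '-')
      simp at hxm hxne
      rcases hxm with h | h <;> omega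
    · have hane : a ≠ '+' := hap
      have hcnd : ¬(a ∈ (['+', '-'] : List Char) ∧ ¬(a = '-' ∧ (0 : Int) = 0)) := by
        intro hh
        obtain ⟨hm, hns⟩ := hh
        have hm' : a = '+' ∨ a = '-' := by simpa using hm
        rcases hm' with h | h
        · exact hane h
        · exact hns ⟨h, rfl⟩
      rw [if_neg hcnd]
      rw [show (0 : Int) + 1 = 1 from rfl]
      rw [fopLoop_eq_find? t _ 1 (Or.inr (le_refl 1))]
      have hBr : minOr (((['+', '-'] : List Char).map (fun op => altOpPos expr op)).filter (fun p => p ≠ -1)) =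
          shiftI (fIdx t ['+', '-']) := by
        rw [hB, idxInt_cons_ne t hane]
        rw [show ([shiftI (idxInt t '+'), shiftI (idxInt t '-')] : List Int) =
            ([idxInt t '+', idxInt t '-'] : List Int).map shiftI from rfl]
        rw [filter_shift (by
          intro z hz; simp at hz
          rcases hz with h | h <;>
            exact h ▸ neg_one_le_idxInt t _)]
        rw [minOr_map_add_one (by
          intro x hx
          obtain ⟨hxm, hxne⟩ := List.mem_filter.1 hx
          have g1 := neg_one_le_idxInt t '+'
          have g2 := neg_one_le_idxInt t '-'
          simp at hxm hxne
          rcases hxm with h | h <;> omega)]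
        have := minOr_filter_idx t ['+', '-']
        simp only [List.map_cons, List.map_nil] at this
        rw [this]
      rw [hBr]
      have hC := find?_fIdx t ['+', '-']
      cases hf : t.find? (fun c => decide (c ∈ (['+', '-'] : List Char))) with
      | none =>
        rw [hf] at hC
        simp [hC, shiftI]
      | some c =>
        rw [hf] at hC
        dsimp only
        have hc : c ∈ (['+', '-'] : List Char) := by
          have := List.find?_some hf; simpa using this
        by_cases hcm : c = '-'
        · by_cases ham : a = '-'
          · have hpos : c = '-' ∧ PySem.Str.pyGet? expr 0 = some '-' := ⟨hcm, by rw [hget, ham]⟩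
            rw [if_pos hpos]
            rw [PySem.Str.findFrom_eq, hl]
            rw [show ("-" : String).toList = ['-'] from rfl, findFrom_cons]
            rw [hC, hcm]
          · have hneg : ¬(c = '-' ∧ PySem.Str.pyGet? expr 0 = some '-') := by
              intro hh
              rw [hget] at hh
              exact ham (Option.some.inj hh.2)
            rw [if_neg hneg]
            rw [PySem.Str.find_eq, String.toList_ofList, hl, find_singleton]
            rw [idxInt_cons_ne t (fun he => ham (he.trans hcm)), hC]
        · have hc' : c = '+' ∨ c = '-' := by simpa using hc
          have hcp : c = '+' := by rcases hc' with h | h; exact h; exact absurd h hcm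
          rw [if_neg (fun hh => hcm hh.1)]
          rw [PySem.Str.find_eq, String.toList_ofList, hl, find_singleton]
          rw [idxInt_cons_ne t (fun he => hane (he.trans hcp)), hC]

lemma alt_eval_multdiv (expr : String) :
    (['*', '/', '%'] : List Char).map (fun op => altOpPos expr op) =
      (['*', '/', '%'] : List Char).map (fun op => idxInt expr.toList op) := by
  simp only [List.map_cons, List.map_nil]
  simp [altOpPos, PySem.Str.find_eq, find_singleton]

-- ===== VERDICT (by name: the statement is the Claim_ definition above) =====
theorem find_operator_pos_spec : Claim_equal_find_operator_pos := by
  intro expr precidence _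
  unfold Spec_find_operator_pos find_operator_pos find_operator_pos_alt
  by_cases h1 : precidence = "mult_div"
  · subst h1
    rw [if_pos (show (("mult_div" : String) == "mult_div") = true from by decide),
      if_neg (show ¬((("mult_div" : String) == "exponent") = true) from by decide)]
    show fopTail expr ['*', '/', '%'] =
      minOr (((['*', '/', '%'] : List Char).map (fun op => altOpPos expr op)).filter (fun p => p ≠ -1))
    rw [fopTail_eq_fIdx (by decide), alt_eval_multdiv, minOr_filter_idx]
  · by_cases h2 : precidence = "exponent"
    · subst h2
      rw [if_neg (show ¬((("exponent" : String) == "mult_div") = true) from by decide),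
        if_pos (show (("exponent" : String) == "exponent") = true from by decide),
        if_pos (show (("exponent" : String) == "exponent") = true from by decide)]
      by_cases his : PySem.Str.isIn "^" expr = true
      · rw [if_pos his]
      · rw [if_neg his]
        have his' : PySem.Chars.isIn ['^'] expr.toList = false := by
          have := Bool.eq_false_iff.2 his
          rwa [PySem.Str.isIn_eq] at this
        have hnm : '^' ∉ expr.toList := fun hm =>
          (PySem.Chars.isIn_eq_false_iff _ _).1 his' ((List.singleton_infix_iff _ _).2 hm)
        rw [fopTail_eq_fIdx (by decide),
          fIdx_not_mem (fun x hx => by simp only [List.mem_singleton]; intro he; exact hnm (he ▸ hx)),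
          PySem.Str.rfind_eq, show ("^" : String).toList = ['^'] from rfl, rfind_not_mem hnm]
    · have hb1 : ¬((precidence == "mult_div") = true) := by simpa using h1
      have hb2 : ¬((precidence == "exponent") = true) := by simpa using h2
      rw [if_neg hb1, if_neg hb2, if_neg hb2]
      show fopTail expr ['+', '-'] =
        minOr (((if (precidence == "mult_div") = true then ['*', '/', '%'] else ['+', '-'] : List Char)).map
          (fun op => altOpPos expr op) |>.filter (fun p => p ≠ -1))
      rw [if_neg hb1]
      exact fopTail_addsub expr
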